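-- pv_equiv track=rewrite | github.com/Themichaelreimer/financial-analysis | analysis.py | count_times_positive
-- ===== SOURCE A (Python) =====
-- def count_times_positive(data:list) -> int:
--     times = 0
--     for x in data:
--         if x>0:
--             times += 1
--         elif x<0:
--             times -= 1
--     return times
-- ===== SOURCE B (Python) =====
-- def count_times_positive(data: list) -> int:
--     positives = sum(1 for x in data if x > 0)
--     negatives = sum(1 for x in data if x < 0)
--     return positives - negatives
-- ===== Notes on version B (the rewrite author's own statement) =====
-- stated objective: alternative
-- what changed: Replaces the single branching accumulator loop with two independent predicate scans (count of positives, count of negatives) whose difference is returned.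
import Mathlib
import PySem

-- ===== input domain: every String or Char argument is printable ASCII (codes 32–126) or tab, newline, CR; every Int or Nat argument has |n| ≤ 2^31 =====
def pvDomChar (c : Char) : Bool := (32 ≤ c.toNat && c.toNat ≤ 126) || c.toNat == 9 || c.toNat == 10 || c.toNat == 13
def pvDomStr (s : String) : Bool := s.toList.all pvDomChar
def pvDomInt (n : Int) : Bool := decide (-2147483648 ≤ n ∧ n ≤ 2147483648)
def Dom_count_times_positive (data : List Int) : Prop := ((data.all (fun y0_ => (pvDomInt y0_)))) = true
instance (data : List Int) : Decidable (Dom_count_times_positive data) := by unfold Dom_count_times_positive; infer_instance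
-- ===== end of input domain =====

-- B: two independent predicate scans instead of A's single branching accumulator loop (alternative decomposition, same cost).

-- ===== PORT A =====
def count_times_positive (data : List Int) : Int :=
  data.foldl (fun times x => if x > 0 then times + 1 else if x < 0 then times - 1 else times) 0

-- ===== PORT B =====
def count_times_positive_alt (data : List Int) : Int :=
  (data.countP (fun x => x > 0) : Int) - (data.countP (fun x => x < 0) : Int)

-- ===== PRECONDITION & SPEC =====
def Spec_count_times_positive (data : List Int) (out : Int) : Prop := out = count_times_positive_alt data
instance (data : List Int) (out : Int) : Decidable (Spec_count_times_positive data out) := by unfold Spec_count_times_positive; infer_instance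

-- ===== CLAIM (what is proved, stated in full; the proofs are below) =====
def Claim_equal_count_times_positive : Prop := ∀ (data : List Int), Dom_count_times_positive data → Spec_count_times_positive data (count_times_positive data)

-- ===== LEMMAS AND PROOFS =====
theorem ctp_foldl_acc (data : List Int) (acc : Int) :
    data.foldl (fun times x => if x > 0 then times + 1 else if x < 0 then times - 1 else times) acc
      = acc + (data.countP (fun x => x > 0) : Int) - (data.countP (fun x => x < 0) : Int) := by
  induction data generalizing acc with
  | nil => simp
  | cons x xs ih =>
    simp only [List.foldl_cons, List.countP_cons, ih]
    by_cases h1 : x > 0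
    · have h2 : ¬ x < 0 := by omega
      simp [h1, h2]; ring
    · by_cases h2 : x < 0
      · simp [h1, h2]; ring
      · simp [h1, h2]

-- ===== VERDICT (by name: the statement is the Claim_ definition above) =====
theorem count_times_positive_spec : Claim_equal_count_times_positive := by
  intro data _
  unfold Spec_count_times_positive count_times_positive count_times_positive_alt
  rw [ctp_foldl_acc]; ring
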